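-- pv_equiv track=rewrite | github.com/aguspereyra1807/tp_1_pc | tp1_funciones_pereyra.py | Datos
-- ===== SOURCE A (Python) =====
-- def Datos(matriz):
--     '''Extraer los datos "total", "vacios", "quemado", "vivos", "quemandose", "arbolesQuedan", de una matriz'''
--     vivos = 0
--     for fila in matriz:
--         for i in fila:
--             if i == -1:
--                 vivos +=  1
--     quemados = 0
--     for fila in matriz:
--         for i in fila:
--             if i == 0:
--                 quemados += 1
--     vacios = 0
--     for fila in matriz:
--         for i in fila:
--             if i == -2:
--                 vacios += 1
--     total = 0
--     for fila in matriz: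
--         for i in fila:
--             total += 1
--     quemandose = total - vacios - quemados - vivos
--     arbolesQuedan = vivos + quemandose
--     return total, vacios, quemados, vivos, quemandose, arbolesQuedan
-- ===== SOURCE B (Python) =====
-- def Datos(matriz):
--     '''Extraer los datos "total", "vacios", "quemado", "vivos", "quemandose", "arbolesQuedan", de una matriz'''
--     c = {}
--     total = 0
--     for fila in matriz:
--         total += len(fila)
--         for i in fila:
--             c[i] = c.get(i, 0) + 1
--     vivos = c.get(-1, 0)
--     quemados = c.get(0, 0)
--     vacios = c.get(-2, 0)
--     quemandose = total - vacios - quemados - vivos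
--     return total, vacios, quemados, vivos, quemandose, vivos + quemandose
-- ===== Notes on version B (the rewrite author's own statement) =====
-- stated objective: alternative
-- what changed: Replaces A's four separate full scans of the matrix with a single pass that builds a value-histogram dict (and sums row lengths for the total), then reads the three category counts from the histogram.
import Mathlib
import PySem

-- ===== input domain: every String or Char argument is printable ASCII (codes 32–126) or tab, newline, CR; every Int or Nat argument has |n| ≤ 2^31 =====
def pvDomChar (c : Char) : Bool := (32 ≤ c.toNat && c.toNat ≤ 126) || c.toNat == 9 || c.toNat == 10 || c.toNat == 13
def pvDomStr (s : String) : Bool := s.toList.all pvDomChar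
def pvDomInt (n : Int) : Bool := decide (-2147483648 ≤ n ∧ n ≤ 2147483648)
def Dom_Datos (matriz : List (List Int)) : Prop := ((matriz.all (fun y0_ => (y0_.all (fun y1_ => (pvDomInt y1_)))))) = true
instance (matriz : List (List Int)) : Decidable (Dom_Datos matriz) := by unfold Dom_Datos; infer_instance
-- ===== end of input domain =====

-- B replaces A's four separate full scans by one pass building a value histogram; return value only.

-- ===== PORT A =====
def Datos (matriz : List (List Int)) : Int × Int × Int × Int × Int × Int :=
  let vivos : Int := matriz.foldl (fun acc fila =>
    fila.foldl (fun a i => if i = -1 then a + 1 else a) acc) 0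
  let quemados : Int := matriz.foldl (fun acc fila =>
    fila.foldl (fun a i => if i = 0 then a + 1 else a) acc) 0
  let vacios : Int := matriz.foldl (fun acc fila =>
    fila.foldl (fun a i => if i = -2 then a + 1 else a) acc) 0
  let total : Int := matriz.foldl (fun acc fila =>
    fila.foldl (fun a _ => a + 1) acc) 0
  let quemandose := total - vacios - quemados - vivos
  let arbolesQuedan := vivos + quemandose
  (total, vacios, quemados, vivos, quemandose, arbolesQuedan)

-- ===== PORT B =====
def Datos_alt (matriz : List (List Int)) : Int × Int × Int × Int × Int × Int :=
  let st : PySem.Dict Int Int × Int := matriz.foldl (fun st fila =>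
    (fila.foldl (fun c i => c.insert i (c.getD i 0 + 1)) st.1, st.2 + (fila.length : Int))) (PySem.Dict.empty, 0)
  let c := st.1
  let total := st.2
  let vivos := c.getD (-1) 0
  let quemados := c.getD 0 0
  let vacios := c.getD (-2) 0
  let quemandose := total - vacios - quemados - vivos
  (total, vacios, quemados, vivos, quemandose, vivos + quemandose)

-- ===== PRECONDITION & SPEC =====
def Spec_Datos (matriz : List (List Int)) (out : Int × Int × Int × Int × Int × Int) : Prop := out = Datos_alt matriz
instance (matriz : List (List Int)) (out : Int × Int × Int × Int × Int × Int) : Decidable (Spec_Datos matriz out) := by unfold Spec_Datos; infer_instance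

-- ===== CLAIM (what is proved, stated in full; the proofs are below) =====
def Claim_equal_Datos : Prop := ∀ (matriz : List (List Int)), Dom_Datos matriz → Spec_Datos matriz (Datos matriz)

-- ===== LEMMAS AND PROOFS =====

-- nested loop over rows = loop over the flattened matrix
theorem pv_foldl_nested {α β : Type} (f : β → α → β) (matriz : List (List α)) (init : β) :
    matriz.foldl (fun acc fila => fila.foldl f acc) init = matriz.flatten.foldl f init := by
  induction matriz generalizing init with
  | nil => rfl
  | cons fila rest ih => simp [List.foldl, List.flatten, List.foldl_append, ih]

-- A's counting loop computes List.count of the flattened matrix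
theorem pv_count_loop (v : Int) (xs : List Int) (init : Int) :
    xs.foldl (fun a i => if i = v then a + 1 else a) init = init + (xs.count v : Int) := by
  induction xs generalizing init with
  | nil => simp
  | cons x xs ih =>
    simp only [List.foldl, List.count_cons, ih]
    by_cases h : x = v <;> simp [h] <;> omega

theorem pv_total_loop (xs : List Int) (init : Int) :
    xs.foldl (fun a _ => a + 1) init = init + (xs.length : Int) := by
  induction xs generalizing init with
  | nil => simp
  | cons x xs ih => simp [List.foldl, ih]; ring

-- B's histogram pass builds Counter of the flattened matrix and the total length
theorem pv_hist_loop (matriz : List (List Int)) :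
    matriz.foldl (fun (st : PySem.Dict Int Int × Int) fila =>
      (fila.foldl (fun c i => c.insert i (c.getD i 0 + 1)) st.1, st.2 + (fila.length : Int)))
      (PySem.Dict.empty, 0)
    = (PySem.Dict.counter matriz.flatten, (matriz.flatten.length : Int)) := by
  have h : ∀ (rows : List (List Int)) (d : PySem.Dict Int Int) (t : Int),
      rows.foldl (fun (st : PySem.Dict Int Int × Int) fila =>
        (fila.foldl (fun c i => c.insert i (c.getD i 0 + 1)) st.1, st.2 + (fila.length : Int))) (d, t)
      = (rows.flatten.foldl (fun c i => c.insert i (c.getD i 0 + 1)) d,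
         t + (rows.flatten.length : Int)) := by
    intro rows
    induction rows with
    | nil => intro d t; simp
    | cons fila rest ih =>
      intro d t
      simp only [List.foldl, List.flatten, ih, List.append_eq, List.foldl_append,
        List.length_append, Prod.mk.injEq]
      exact ⟨trivial, by push_cast; ring⟩
  rw [h]
  rw [← PySem.Dict.foldl_insert_getD_add_one_eq_counter]
  simp

theorem Datos_eq (matriz : List (List Int)) : Datos matriz = Datos_alt matriz := by
  unfold Datos Datos_alt
  rw [pv_hist_loop]
  simp only [pv_foldl_nested]
  simp only [pv_count_loop, pv_total_loop, PySem.Dict.getD_counter, zero_add]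

-- ===== VERDICT (by name: the statement is the Claim_ definition above) =====
theorem Datos_spec : Claim_equal_Datos := by
  intro matriz _
  unfold Spec_Datos
  exact Datos_eq matriz
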